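-- pv_equiv track=rewrite | github.com/huir0/codingtest-prep | 백준/Gold/21606. 아침 산책/아침 산책.py | dfs
-- ===== SOURCE A (Python) =====
-- def dfs(graph, start, visited, indoors):
--     cnt = 0
--     visited.add(start)
--     for neighbour in graph[start]:
--         if neighbour not in visited:
--             if indoors[neighbour-1]:
--                 cnt += 1
--             else:
--                 cnt += dfs(graph, neighbour, visited, indoors)
--     return cnt
-- ===== SOURCE B (Python) =====
-- def dfs(graph, start, visited, indoors):
--     # Iterative version: explicit stack of pending neighbour-list suffixes
--     # (mutates `visited` exactly like the recursive original).
--     cnt = 0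
--     visited.add(start)
--     stack = [graph[start]]
--     while stack:
--         neighbours = stack.pop()
--         if not neighbours:
--             continue
--         nb = neighbours[0]
--         stack.append(neighbours[1:])
--         if nb not in visited:
--             if indoors[nb - 1]:
--                 cnt += 1
--             else:
--                 visited.add(nb)
--                 stack.append(graph[nb])
--     return cnt
-- ===== Notes on version B (the rewrite author's own statement) =====
-- stated objective: alternative
-- what changed: A's recursion is replaced by an iterative while-loop over an explicit stack of pending neighbour-list suffixes (no Python recursion; same final `visited` mutation and the same left-to-right visit order).
import Mathlib
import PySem

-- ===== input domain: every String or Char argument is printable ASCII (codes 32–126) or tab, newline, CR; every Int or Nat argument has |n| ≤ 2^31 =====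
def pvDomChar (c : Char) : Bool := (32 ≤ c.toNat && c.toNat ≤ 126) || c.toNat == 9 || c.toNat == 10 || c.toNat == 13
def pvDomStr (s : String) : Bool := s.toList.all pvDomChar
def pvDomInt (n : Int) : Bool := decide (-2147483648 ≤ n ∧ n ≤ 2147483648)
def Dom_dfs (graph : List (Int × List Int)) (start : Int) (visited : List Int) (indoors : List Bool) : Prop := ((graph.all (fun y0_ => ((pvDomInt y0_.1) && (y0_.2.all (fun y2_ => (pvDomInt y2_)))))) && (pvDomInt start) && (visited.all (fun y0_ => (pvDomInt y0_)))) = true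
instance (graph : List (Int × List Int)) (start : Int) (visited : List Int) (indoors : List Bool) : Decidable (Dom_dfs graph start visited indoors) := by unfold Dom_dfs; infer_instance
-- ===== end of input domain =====

-- B replaces A's recursion by an iterative loop over an explicit stack of pending
-- neighbour-list suffixes (same mutation of `visited`; equivalence proved for the return value).

-- ===== PORT A =====
-- the adjacency values of the graph: every node ever added to `visited` (except `start`)
-- comes from here; used only to compute a provably sufficient fuel for the recursion
def pvU (graph : List (Int × List Int)) : List Int := graph.flatMap Prod.snd

def pvMu (graph : List (Int × List Int)) (V : PySem.Set Int) : Nat :=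
  ((pvU graph).filter (fun x => !(PySem.Set.contains V x))).length

-- the body of A's `for neighbour in graph[start]` loop, threading (cnt, visited);
-- `rec` is the recursive call `dfs(graph, neighbour, visited, indoors)`
def pvGoA (indoors : List Bool) (rec : Int → PySem.Set Int → Option (Int × PySem.Set Int)) :
    List Int → PySem.Set Int → Int → Option (Int × PySem.Set Int)
  | [], V, cnt => some (cnt, V)
  | nb :: rest, V, cnt =>
    if PySem.Set.contains V nb then pvGoA indoors rec rest V cnt
    else
      match PySem.List.pyGet? indoors (nb - 1) with   -- indoors[neighbour-1] (IndexError = none)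
      | none => none
      | some b =>
        if b then pvGoA indoors rec rest V (cnt + 1)
        else
          match rec nb V with
          | none => none
          | some (c, V') => pvGoA indoors rec rest V' (cnt + c)

-- A's recursion, with fuel as a pure totality guard (a provably sufficient amount is passed)
def pvDfsA (graph : List (Int × List Int)) (indoors : List Bool) :
    Nat → Int → PySem.Set Int → Option (Int × PySem.Set Int)
  | 0, _, _ => none
  | fuel + 1, start, V =>
    match PySem.Dict.get? (PySem.Dict.mk graph) start with   -- graph[start] (KeyError = none)
    | none => none
    | some ns => pvGoA indoors (pvDfsA graph indoors fuel) ns (PySem.Set.add V start) 0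

def dfs (graph : List (Int × List Int)) (start : Int) (visited : List Int) (indoors : List Bool) : Int :=
  let V0 := PySem.Set.ofList visited
  match pvDfsA graph indoors (pvMu graph (PySem.Set.add V0 start) + 1) start V0 with
  | none => 0          -- unreachable under Pre_dfs (Python raises there)
  | some (c, _) => c

-- ===== PORT B =====
-- maximal adjacency-list length + 2: the per-step growth bound of B's stack,
-- used only to compute a provably sufficient fuel for the loop
def pvK (graph : List (Int × List Int)) : Nat :=
  graph.foldr (fun p m => max p.2.length m) 0 + 2

def pvMeasB (graph : List (Int × List Int)) (stack : List (List Int)) (V : PySem.Set Int) : Nat :=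
  (stack.map (fun l => l.length + 1)).sum + pvK graph * pvMu graph V

-- B's `while stack:` loop (stack top at the list head), fueled as a pure totality guard
def pvLoopB (graph : List (Int × List Int)) (indoors : List Bool) :
    Nat → List (List Int) → PySem.Set Int → Int → Option (Int × PySem.Set Int)
  | 0, _, _, _ => none
  | fuel + 1, stack, V, cnt =>
    match stack with
    | [] => some (cnt, V)
    | ns :: S =>
      match ns with
      | [] => pvLoopB graph indoors fuel S V cnt                  -- if not neighbours: continue
      | nb :: rest =>                                             -- nb = neighbours[0]; push neighbours[1:]
        if PySem.Set.contains V nb then pvLoopB graph indoors fuel (rest :: S) V cnt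
        else
          match PySem.List.pyGet? indoors (nb - 1) with           -- indoors[nb-1]
          | none => none
          | some b =>
            if b then pvLoopB graph indoors fuel (rest :: S) V (cnt + 1)
            else
              match PySem.Dict.get? (PySem.Dict.mk graph) nb with -- graph[nb]
              | none => none
              | some ns2 => pvLoopB graph indoors fuel (ns2 :: rest :: S) (PySem.Set.add V nb) cnt

def dfs_alt (graph : List (Int × List Int)) (start : Int) (visited : List Int) (indoors : List Bool) : Int :=
  let V1 := PySem.Set.add (PySem.Set.ofList visited) start
  match PySem.Dict.get? (PySem.Dict.mk graph) start with   -- stack = [graph[start]]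
  | none => 0          -- unreachable under Pre_dfs (Python raises there)
  | some ns =>
    match pvLoopB graph indoors (pvMeasB graph [ns] V1 + 1) [ns] V1 0 with
    | none => 0        -- unreachable: the fuel is sufficient
    | some (c, _) => c

-- ===== PRECONDITION & SPEC =====
-- the closure of {start} under "v is an outdoor (indoors[v-1] == False), unvisited, non-start
-- neighbour of a node of the set": exactly the nodes A's traversal can process
def pvReachStep (graph : List (Int × List Int)) (visited : List Int) (start : Int)
    (indoors : List Bool) (S : PySem.Set Int) : PySem.Set Int :=
  S.foldl (fun acc u =>
    ((PySem.Dict.get? (PySem.Dict.mk graph) u).getD []).foldl (fun acc2 v =>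
      if PySem.List.pyGet? indoors (v - 1) = some false ∧ v ∉ visited ∧ v ≠ start
      then PySem.Set.add acc2 v else acc2) acc) S

def pvReach (graph : List (Int × List Int)) (visited : List Int) (start : Int)
    (indoors : List Bool) : Nat → PySem.Set Int
  | 0 => PySem.Set.add PySem.Set.empty start
  | n + 1 => pvReachStep graph visited start indoors (pvReach graph visited start indoors n)

-- Pre_dfs holds exactly when A raises no exception: start is a graph key, and every neighbour
-- the traversal can check (a non-visited, non-start neighbour of a node of the reachable set)
-- has a valid Python index into indoors and, when outdoor, is itself a graph key.
def Pre_dfs (graph : List (Int × List Int)) (start : Int) (visited : List Int) (indoors : List Bool) : Prop :=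
  (PySem.Dict.get? (PySem.Dict.mk graph) start).isSome = true ∧
  ∀ u ∈ pvReach graph visited start indoors ((graph.flatMap Prod.snd).length + 1),
    ∀ v ∈ (PySem.Dict.get? (PySem.Dict.mk graph) u).getD [],
      v ∉ visited → v ≠ start →
        ((PySem.List.pyGet? indoors (v - 1)).isSome = true ∧
         (PySem.List.pyGet? indoors (v - 1) = some false →
           (PySem.Dict.get? (PySem.Dict.mk graph) v).isSome = true))
instance (graph : List (Int × List Int)) (start : Int) (visited : List Int) (indoors : List Bool) : Decidable (Pre_dfs graph start visited indoors) := by unfold Pre_dfs; infer_instance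

def pvWitness_dfs : (List (Int × List Int)) × Int × List Int × List Bool :=
  ([(1, [2, 3]), (2, []), (3, [])], 1, [], [true, true, true])

def Spec_dfs (graph : List (Int × List Int)) (start : Int) (visited : List Int) (indoors : List Bool) (out : Int) : Prop := out = dfs_alt graph start visited indoors
instance (graph : List (Int × List Int)) (start : Int) (visited : List Int) (indoors : List Bool) (out : Int) : Decidable (Spec_dfs graph start visited indoors out) := by unfold Spec_dfs; infer_instance

-- ===== CLAIM (what is proved, stated in full; the proofs are below) =====
def Claim_equal_dfs : Prop := ∀ (graph : List (Int × List Int)) (start : Int) (visited : List Int) (indoors : List Bool), Dom_dfs graph start visited indoors → Pre_dfs graph start visited indoors → Spec_dfs graph start visited indoors (dfs graph start visited indoors)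

-- ===== LEMMAS AND PROOFS =====

-- membership-inclusion of visited sets
def pvSub (V W : PySem.Set Int) : Prop := ∀ x : Int, x ∈ V → x ∈ W

theorem pvSub_refl (V : PySem.Set Int) : pvSub V V := fun _ h => h

theorem pvSub_trans {U V W : PySem.Set Int} (h1 : pvSub U V) (h2 : pvSub V W) : pvSub U W :=
  fun x hx => h2 x (h1 x hx)

theorem pvSub_add (V : PySem.Set Int) (x : Int) : pvSub V (PySem.Set.add V x) :=
  fun y hy => (PySem.Set.mem_add V x y).2 (Or.inl hy)

theorem pv_filter_len_le (l : List Int) (p q : Int → Bool) (h : ∀ x, q x = true → p x = true) :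
    (l.filter q).length ≤ (l.filter p).length := by
  induction l with
  | nil => simp
  | cons a t ih =>
    by_cases hq : q a = true
    · simp [List.filter_cons, hq, h a hq]; omega
    · simp only [List.filter_cons]
      simp only [Bool.not_eq_true] at hq
      rw [hq]
      by_cases hp : p a = true
      · simp [hp]; omega
      · simp only [Bool.not_eq_true] at hp
        rw [hp]; simpa using ih

theorem pv_filter_len_lt (l : List Int) (p q : Int → Bool) (h : ∀ x, q x = true → p x = true)
    (x : Int) (hpx : p x = true) (hqx : q x = false) :
    x ∈ l → (l.filter q).length < (l.filter p).length := by
  induction l with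
  | nil => intro hx; simp at hx
  | cons a t ih =>
    intro hx
    rcases List.mem_cons.1 hx with hx | hx
    · subst hx
      simp [hpx, hqx]
      exact pv_filter_len_le t p q h
    · simp only [List.filter_cons]
      by_cases hq : q a = true
      · rw [hq, h a hq]
        simpa using ih hx
      · simp only [Bool.not_eq_true] at hq
        rw [hq]
        by_cases hp : p a = true
        · rw [hp]
          have := ih hx
          simp at this ⊢; omega
        · simp only [Bool.not_eq_true] at hp
          rw [hp]
          simpa using ih hx

theorem pvMu_mono (g : List (Int × List Int)) {V W : PySem.Set Int} (h : pvSub V W) :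
    pvMu g W ≤ pvMu g V := by
  apply pv_filter_len_le
  intro x hx
  simp only [Bool.not_eq_true'] at hx ⊢
  by_contra hv
  have hxV : x ∈ V := (PySem.Set.contains_iff V x).1 (by revert hv; cases PySem.Set.contains V x <;> simp)
  rw [(PySem.Set.contains_iff W x).2 (h x hxV)] at hx
  cases hx

theorem pvMu_strict (g : List (Int × List Int)) (V : PySem.Set Int) (nb : Int)
    (hU : nb ∈ pvU g) (hc : PySem.Set.contains V nb = false) :
    pvMu g (PySem.Set.add V nb) < pvMu g V := by
  apply pv_filter_len_lt _ _ _ _ nb _ _ hU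
  · intro y hy
    simp only [Bool.not_eq_true'] at hy ⊢
    by_contra hv
    have hyV : y ∈ V := (PySem.Set.contains_iff V y).1 (by revert hv; cases PySem.Set.contains V y <;> simp)
    have : y ∈ PySem.Set.add V nb := (PySem.Set.mem_add V nb y).2 (Or.inl hyV)
    rw [(PySem.Set.contains_iff _ y).2 this] at hy
    cases hy
  · have hnm : nb ∉ V := fun hm => by rw [(PySem.Set.contains_iff V nb).2 hm] at hc; cases hc
    simp [hnm]
  · have hmm : nb ∈ PySem.Set.add V nb := (PySem.Set.mem_add V nb nb).2 (Or.inr rfl)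
    simp [hmm]

-- the visited set only grows
theorem pvGoA_mono (indoors : List Bool)
    (rec : Int → PySem.Set Int → Option (Int × PySem.Set Int))
    (hrec : ∀ s V r, rec s V = some r → pvSub V r.2) :
    ∀ ns V c r, pvGoA indoors rec ns V c = some r → pvSub V r.2 := by
  intro ns
  induction ns with
  | nil => intro V c r h; simp [pvGoA] at h; cases h; exact pvSub_refl _
  | cons nb rest ih =>
    intro V c r h
    by_cases hc : PySem.Set.contains V nb = true
    · rw [pvGoA, if_pos hc] at h; exact ih _ _ _ h
    · rw [pvGoA, if_neg hc] at h
      cases hg : PySem.List.pyGet? indoors (nb - 1) with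
      | none => rw [hg] at h; cases h
      | some b =>
        rw [hg] at h
        cases b with
        | true => simp at h; exact ih _ _ _ h
        | false =>
          simp at h
          cases hr : rec nb V with
          | none => rw [hr] at h; cases h
          | some p =>
            rw [hr] at h
            exact pvSub_trans (hrec _ _ _ hr) (ih _ _ _ h)

theorem pvDfsA_mono (g : List (Int × List Int)) (indoors : List Bool) :
    ∀ fuel s V r, pvDfsA g indoors fuel s V = some r → pvSub V r.2 := by
  intro fuel
  induction fuel with
  | zero => intro s V r h; cases h
  | succ f ih =>
    intro s V r h
    rw [pvDfsA] at h
    cases hg : PySem.Dict.get? (PySem.Dict.mk g) s with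
    | none => rw [hg] at h; cases h
    | some ns =>
      rw [hg] at h
      exact pvSub_trans (pvSub_add V s) (pvGoA_mono indoors _ ih ns _ 0 r h)

-- every adjacency value looked up is in pvU
theorem pv_get?_sub_U (g : List (Int × List Int)) (s : Int) (ns : List Int)
    (h : PySem.Dict.get? (PySem.Dict.mk g) s = some ns) : ∀ x ∈ ns, x ∈ pvU g := by
  induction g with
  | nil => simp [PySem.Dict.get?] at h
  | cons p t ih =>
    intro x hx
    rcases p with ⟨k, v⟩
    rw [PySem.Dict.get?_mk_cons] at h
    by_cases hk : (k == s) = true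
    · rw [if_pos hk] at h
      injection h with h2
      subst h2
      show x ∈ ((k, v) :: t).flatMap Prod.snd
      rw [List.flatMap_cons]
      exact List.mem_append.2 (Or.inl hx)
    · rw [if_neg hk] at h
      show x ∈ ((k, v) :: t).flatMap Prod.snd
      rw [List.flatMap_cons]
      exact List.mem_append.2 (Or.inr (ih h x hx))

theorem pv_get?_len_K (g : List (Int × List Int)) (s : Int) (ns : List Int)
    (h : PySem.Dict.get? (PySem.Dict.mk g) s = some ns) : ns.length + 2 ≤ pvK g := by
  induction g with
  | nil => simp [PySem.Dict.get?] at h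
  | cons p t ih =>
    rcases p with ⟨k, v⟩
    rw [PySem.Dict.get?_mk_cons] at h
    by_cases hk : (k == s) = true
    · rw [if_pos hk] at h
      cases h
      simp only [pvK, List.foldr_cons]
      omega
    · rw [if_neg hk] at h
      have := ih h
      simp only [pvK, List.foldr_cons] at this ⊢
      omega

-- congruence: pvGoA only calls `rec` on unvisited adjacency nodes over a grown visited set
theorem pvGoA_congr (g : List (Int × List Int)) (indoors : List Bool)
    (rec1 rec2 : Int → PySem.Set Int → Option (Int × PySem.Set Int))
    (hmono : ∀ s V r, rec1 s V = some r → pvSub V r.2)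
    (V0 : PySem.Set Int)
    (h : ∀ nb W, pvSub V0 W → PySem.Set.contains W nb = false → nb ∈ pvU g →
          rec1 nb W = rec2 nb W) :
    ∀ ns V c, (∀ x ∈ ns, x ∈ pvU g) → pvSub V0 V →
      pvGoA indoors rec1 ns V c = pvGoA indoors rec2 ns V c := by
  intro ns
  induction ns with
  | nil => intro V c _ _; rfl
  | cons nb rest ih =>
    intro V c hU hsub
    by_cases hc : PySem.Set.contains V nb = true
    · rw [pvGoA, pvGoA, if_pos hc, if_pos hc]
      exact ih V c (fun x hx => hU x (List.mem_cons_of_mem _ hx)) hsub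
    · rw [pvGoA, pvGoA, if_neg hc, if_neg hc]
      cases hg : PySem.List.pyGet? indoors (nb - 1) with
      | none => rfl
      | some b =>
        cases b with
        | true =>
          simp only
          exact ih V (c + 1) (fun x hx => hU x (List.mem_cons_of_mem _ hx)) hsub
        | false =>
          simp only
          rw [h nb V hsub (by simpa using hc) (hU nb (List.mem_cons_self))]
          cases hr : rec2 nb V with
          | none => rfl
          | some p =>
            have hr1 : rec1 nb V = some p := by
              rw [h nb V hsub (by simpa using hc) (hU nb (List.mem_cons_self))]; exact hr
            exact ih p.2 (c + p.1) (fun x hx => hU x (List.mem_cons_of_mem _ hx))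
              (pvSub_trans hsub (hmono _ _ _ hr1))

-- A's recursion with self-adjusting sufficient fuel
def pvDfsInf (g : List (Int × List Int)) (indoors : List Bool) (s : Int) (V : PySem.Set Int) :
    Option (Int × PySem.Set Int) :=
  pvDfsA g indoors (pvMu g (PySem.Set.add V s) + 1) s V

-- fuel indifference: any fuel above the measure computes pvDfsInf
theorem pvDfsA_eq_inf (g : List (Int × List Int)) (indoors : List Bool) :
    ∀ fuel s V, pvMu g (PySem.Set.add V s) < fuel →
      pvDfsA g indoors fuel s V = pvDfsInf g indoors s V := by
  intro fuel
  induction fuel using Nat.strong_induction_on with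
  | _ fuel IH =>
    intro s V hf
    match fuel, hf with
    | f + 1, hf =>
      rw [pvDfsInf, pvDfsA, pvDfsA]
      cases hg : PySem.Dict.get? (PySem.Dict.mk g) s with
      | none => rfl
      | some ns =>
        simp only
        have hcall : ∀ nb W, pvSub (PySem.Set.add V s) W → PySem.Set.contains W nb = false →
            nb ∈ pvU g → pvDfsA g indoors f nb W = pvDfsA g indoors (pvMu g (PySem.Set.add V s)) nb W := by
          intro nb W hsub hc hU
          have hWle : pvMu g W ≤ pvMu g (PySem.Set.add V s) := pvMu_mono g hsub
          have hlt : pvMu g (PySem.Set.add W nb) < pvMu g W := pvMu_strict g W nb hU hc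
          have h1 : pvDfsA g indoors f nb W = pvDfsInf g indoors nb W := by
            apply IH f (by omega) nb W; omega
          have h2 : pvDfsA g indoors (pvMu g (PySem.Set.add V s)) nb W = pvDfsInf g indoors nb W := by
            apply IH (pvMu g (PySem.Set.add V s)) (by omega) nb W; omega
          rw [h1, h2]
        exact pvGoA_congr g indoors _ _ (pvDfsA_mono g indoors f) (PySem.Set.add V s) hcall
          ns (PySem.Set.add V s) 0 (pv_get?_sub_U g s ns hg) (pvSub_refl _)

-- one-step unfolding of pvDfsInf into a pvGoA over pvDfsInf itself
theorem pvDfsInf_unfold (g : List (Int × List Int)) (indoors : List Bool) (nb : Int) (V : PySem.Set Int) :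
    pvDfsInf g indoors nb V =
      match PySem.Dict.get? (PySem.Dict.mk g) nb with
      | none => none
      | some ns2 => pvGoA indoors (pvDfsInf g indoors) ns2 (PySem.Set.add V nb) 0 := by
  rw [pvDfsInf, pvDfsA]
  cases hg : PySem.Dict.get? (PySem.Dict.mk g) nb with
  | none => rfl
  | some ns2 =>
    simp only
    apply pvGoA_congr g indoors _ _ (pvDfsA_mono g indoors _) (PySem.Set.add V nb) _
      ns2 (PySem.Set.add V nb) 0 (pv_get?_sub_U g nb ns2 hg) (pvSub_refl _)
    intro nb' W hsub hc hU
    apply pvDfsA_eq_inf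
    have hWle : pvMu g W ≤ pvMu g (PySem.Set.add V nb) := pvMu_mono g hsub
    have hlt : pvMu g (PySem.Set.add W nb') < pvMu g W := pvMu_strict g W nb' hU hc
    omega

-- the count parameter of pvGoA is a pure accumulator
theorem pvGoA_shift (indoors : List Bool)
    (rec : Int → PySem.Set Int → Option (Int × PySem.Set Int)) :
    ∀ ns V c, pvGoA indoors rec ns V c =
      (pvGoA indoors rec ns V 0).map (fun r => (c + r.1, r.2)) := by
  intro ns
  induction ns with
  | nil => intro V c; simp [pvGoA]
  | cons nb rest ih =>
    intro V c
    by_cases hc : PySem.Set.contains V nb = true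
    · rw [pvGoA, pvGoA, if_pos hc, if_pos hc]; exact ih V c
    · rw [pvGoA, pvGoA, if_neg hc, if_neg hc]
      cases hg : PySem.List.pyGet? indoors (nb - 1) with
      | none => rfl
      | some b =>
        cases b with
        | true =>
          simp only
          rw [ih V (c + 1), ih V (0 + 1)]
          cases pvGoA indoors rec rest V 0 with
          | none => rfl
          | some r => simp [Option.map]; omega
        | false =>
          simp only
          cases hr : rec nb V with
          | none => rfl
          | some p =>
            simp only
            rw [ih p.2 (c + p.1), ih p.2 (0 + p.1)]
            cases pvGoA indoors rec rest p.2 0 with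
            | none => rfl
            | some r => simp [Option.map]; omega

-- B's stack semantics expressed through A's per-node function
def pvRun (g : List (Int × List Int)) (indoors : List Bool) :
    List (List Int) → PySem.Set Int → Int → Option (Int × PySem.Set Int)
  | [], V, c => some (c, V)
  | ns :: S, V, c =>
    match pvGoA indoors (pvDfsInf g indoors) ns V 0 with
    | none => none
    | some r => pvRun g indoors S r.2 (c + r.1)

-- pvRun absorbs one processed neighbour, in each of the three shapes of a loop step
theorem pvRun_skip (g : List (Int × List Int)) (indoors : List Bool)
    (nb : Int) (rest : List Int) (S : List (List Int)) (V : PySem.Set Int) (cnt : Int)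
    (hc : PySem.Set.contains V nb = true) :
    pvRun g indoors ((nb :: rest) :: S) V cnt = pvRun g indoors (rest :: S) V cnt := by
  rw [pvRun, pvRun, pvGoA, if_pos hc]

theorem pvRun_indoor (g : List (Int × List Int)) (indoors : List Bool)
    (nb : Int) (rest : List Int) (S : List (List Int)) (V : PySem.Set Int) (cnt : Int)
    (hc : PySem.Set.contains V nb = false)
    (hg : PySem.List.pyGet? indoors (nb - 1) = some true) :
    pvRun g indoors ((nb :: rest) :: S) V cnt = pvRun g indoors (rest :: S) V (cnt + 1) := by
  have h1 : pvGoA indoors (pvDfsInf g indoors) (nb :: rest) V 0 =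
      pvGoA indoors (pvDfsInf g indoors) rest V (0 + 1) := by
    rw [pvGoA, if_neg (by rw [hc]; simp), hg]
    rfl
  rw [pvRun, pvRun, h1, pvGoA_shift indoors _ rest V (0 + 1)]
  cases hres : pvGoA indoors (pvDfsInf g indoors) rest V 0 with
  | none => rfl
  | some r =>
    show pvRun g indoors S r.2 (cnt + (0 + 1 + r.1)) = pvRun g indoors S r.2 (cnt + 1 + r.1)
    have h2 : cnt + (0 + 1 + r.1) = cnt + 1 + r.1 := by ring
    rw [h2]

theorem pvRun_push (g : List (Int × List Int)) (indoors : List Bool)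
    (nb : Int) (rest ns2 : List Int) (S : List (List Int)) (V : PySem.Set Int) (cnt : Int)
    (hc : PySem.Set.contains V nb = false)
    (hg : PySem.List.pyGet? indoors (nb - 1) = some false)
    (hd : PySem.Dict.get? (PySem.Dict.mk g) nb = some ns2) :
    pvRun g indoors ((nb :: rest) :: S) V cnt =
      pvRun g indoors (ns2 :: rest :: S) (PySem.Set.add V nb) cnt := by
  have hinf : pvDfsInf g indoors nb V =
      pvGoA indoors (pvDfsInf g indoors) ns2 (PySem.Set.add V nb) 0 := by
    rw [pvDfsInf_unfold, hd]
  have h1 : pvGoA indoors (pvDfsInf g indoors) (nb :: rest) V 0 =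
      match pvGoA indoors (pvDfsInf g indoors) ns2 (PySem.Set.add V nb) 0 with
      | none => none
      | some (c, V') => pvGoA indoors (pvDfsInf g indoors) rest V' (0 + c) := by
    rw [pvGoA, if_neg (by rw [hc]; simp), hg, hinf]
    rfl
  rw [pvRun, pvRun, h1]
  cases h2 : pvGoA indoors (pvDfsInf g indoors) ns2 (PySem.Set.add V nb) 0 with
  | none => rfl
  | some r2 =>
    obtain ⟨c2, V2⟩ := r2
    show (match pvGoA indoors (pvDfsInf g indoors) rest V2 (0 + c2) with
      | none => none
      | some r => pvRun g indoors S r.2 (cnt + r.1)) = pvRun g indoors (rest :: S) V2 (cnt + c2)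
    rw [pvGoA_shift indoors _ rest V2 (0 + c2), pvRun]
    cases h3 : pvGoA indoors (pvDfsInf g indoors) rest V2 0 with
    | none => rfl
    | some r3 =>
      show pvRun g indoors S r3.2 (cnt + (0 + c2 + r3.1)) = pvRun g indoors S r3.2 (cnt + c2 + r3.1)
      have h4 : cnt + (0 + c2 + r3.1) = cnt + c2 + r3.1 := by ring
      rw [h4]

theorem pvLoopB_spec (g : List (Int × List Int)) (indoors : List Bool) :
    ∀ fuel stack V cnt, pvMeasB g stack V < fuel →
      (∀ ns ∈ stack, ∀ x ∈ ns, x ∈ pvU g) →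
      pvLoopB g indoors fuel stack V cnt = pvRun g indoors stack V cnt := by
  intro fuel
  induction fuel using Nat.strong_induction_on with
  | _ fuel IH =>
    intro stack V cnt hf hinv
    match fuel, hf with
    | f + 1, hf =>
      rcases stack with _ | ⟨ns, S⟩
      · rw [pvLoopB, pvRun]
      rcases ns with _ | ⟨nb, rest⟩
      · -- empty neighbour list: pop and continue
        have hm : pvMeasB g S V < f := by
          simp only [pvMeasB, List.map_cons, List.sum_cons, List.length_nil] at hf ⊢; omega
        rw [pvLoopB]
        show pvLoopB g indoors f S V cnt = pvRun g indoors ([] :: S) V cnt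
        rw [IH f (by omega) S V cnt hm (fun ns hns => hinv ns (List.mem_cons_of_mem _ hns)), pvRun, pvGoA]
        show pvRun g indoors S V cnt = pvRun g indoors S V (cnt + 0)
        rw [add_zero]
      have hrestinv : ∀ ns ∈ rest :: S, ∀ x ∈ ns, x ∈ pvU g := by
        intro ns hns
        rcases List.mem_cons.1 hns with h | h
        · intro x hx; rw [h] at hx
          exact hinv (nb :: rest) List.mem_cons_self x (List.mem_cons_of_mem _ hx)
        · exact hinv ns (List.mem_cons_of_mem _ h)
      have hmeas1 : pvMeasB g (rest :: S) V < f := by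
        simp only [pvMeasB, List.map_cons, List.sum_cons, List.length_cons] at hf ⊢; omega
      rw [pvLoopB]
      show (if PySem.Set.contains V nb then pvLoopB g indoors f (rest :: S) V cnt
        else match PySem.List.pyGet? indoors (nb - 1) with
          | none => none
          | some b =>
            if b then pvLoopB g indoors f (rest :: S) V (cnt + 1)
            else match PySem.Dict.get? (PySem.Dict.mk g) nb with
              | none => none
              | some ns2 => pvLoopB g indoors f (ns2 :: rest :: S) (PySem.Set.add V nb) cnt)
        = pvRun g indoors ((nb :: rest) :: S) V cnt
      by_cases hc : PySem.Set.contains V nb = true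
      · rw [if_pos hc, IH f (by omega) _ V cnt hmeas1 hrestinv,
          pvRun_skip g indoors nb rest S V cnt hc]
      · simp only [Bool.not_eq_true] at hc
        rw [if_neg (by rw [hc]; simp)]
        cases hg : PySem.List.pyGet? indoors (nb - 1) with
        | none =>
          rw [pvRun, pvGoA, if_neg (by rw [hc]; simp), hg]
        | some b =>
          cases b with
          | true =>
            show pvLoopB g indoors f (rest :: S) V (cnt + 1) = pvRun g indoors ((nb :: rest) :: S) V cnt
            rw [IH f (by omega) _ V (cnt + 1) hmeas1 hrestinv,
              pvRun_indoor g indoors nb rest S V cnt hc hg]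
          | false =>
            show (match PySem.Dict.get? (PySem.Dict.mk g) nb with
              | none => none
              | some ns2 => pvLoopB g indoors f (ns2 :: rest :: S) (PySem.Set.add V nb) cnt)
              = pvRun g indoors ((nb :: rest) :: S) V cnt
            cases hd : PySem.Dict.get? (PySem.Dict.mk g) nb with
            | none =>
              have hinf : pvDfsInf g indoors nb V = none := by rw [pvDfsInf_unfold, hd]
              rw [pvRun, pvGoA, if_neg (by rw [hc]; simp), hg, hinf]
              rfl
            | some ns2 =>
              show pvLoopB g indoors f (ns2 :: rest :: S) (PySem.Set.add V nb) cnt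
                = pvRun g indoors ((nb :: rest) :: S) V cnt
              have hnbU : nb ∈ pvU g :=
                hinv (nb :: rest) List.mem_cons_self nb List.mem_cons_self
              have hmu : pvMu g (PySem.Set.add V nb) < pvMu g V := pvMu_strict g V nb hnbU hc
              have hK : ns2.length + 2 ≤ pvK g := pv_get?_len_K g nb ns2 hd
              have hmeas2 : pvMeasB g (ns2 :: rest :: S) (PySem.Set.add V nb) < f := by
                simp only [pvMeasB, List.map_cons, List.sum_cons, List.length_cons] at hf ⊢
                have hmul : pvK g * pvMu g (PySem.Set.add V nb) + pvK g ≤ pvK g * pvMu g V := by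
                  have := Nat.mul_le_mul_left (pvK g) (Nat.succ_le_of_lt hmu)
                  simpa [Nat.mul_succ] using this
                omega
              have hinv2 : ∀ ns ∈ ns2 :: rest :: S, ∀ x ∈ ns, x ∈ pvU g := by
                intro ns hns
                rcases List.mem_cons.1 hns with h | h
                · intro x hx; rw [h] at hx; exact pv_get?_sub_U g nb ns2 hd x hx
                · exact hrestinv ns h
              rw [IH f (by omega) _ _ cnt hmeas2 hinv2,
                pvRun_push g indoors nb rest ns2 S V cnt hc hg hd]

-- the two ports agree on every input
theorem pv_dfs_eq (g : List (Int × List Int)) (s : Int) (vis : List Int) (ind : List Bool) :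
    dfs g s vis ind = dfs_alt g s vis ind := by
  unfold dfs dfs_alt
  dsimp only
  rw [pvDfsA_eq_inf g ind _ s (PySem.Set.ofList vis) (by omega), pvDfsInf_unfold]
  cases hg : PySem.Dict.get? (PySem.Dict.mk g) s with
  | none => rfl
  | some ns =>
    simp only
    rw [pvLoopB_spec g ind _ [ns] (PySem.Set.add (PySem.Set.ofList vis) s) 0 (by omega)
      (by intro ns' hns'
          rcases List.mem_cons.1 hns' with h | h
          · intro x hx; rw [h] at hx; exact pv_get?_sub_U g s ns hg x hx
          · simp at h), pvRun]
    cases hr : pvGoA ind (pvDfsInf g ind) ns (PySem.Set.add (PySem.Set.ofList vis) s) 0 with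
    | none => rfl
    | some r =>
      simp only [pvRun]
      simp

-- ===== VERDICT (by name: the statement is the Claim_ definition above) =====
theorem dfs_spec : Claim_equal_dfs := by
  intro graph start visited indoors _ _
  unfold Spec_dfs
  exact pv_dfs_eq graph start visited indoors
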